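-- pv_equiv track=rewrite | github.com/vinavfx/stock_manager | src/indexing.py | match_to_tags
-- ===== SOURCE A (Python) =====
-- def match_to_tags(name, tags):
--     matches = []
--
--     for tag in tags:
--         if tag in name.lower():
--             matches.append(tag)
--
--     if not matches:
--         return 'not labeled'
--
--     return max(matches, key=len)
-- ===== SOURCE B (Python) =====
-- def match_to_tags(name, tags):
--     name_lower = name.lower()
--     for tag in sorted(tags, key=len, reverse=True):
--         if tag in name_lower:
--             return tag
--     return 'not labeled'
-- ===== Notes on version B (the rewrite author's own statement) =====
-- stated objective: faster
-- what changed: Instead of collecting every matching tag (recomputing name.lower() per tag) and taking max by length, B stably sorts the tags by descending length up front, computes name.lower() once, and returns the first tag that is a substring of it; stability makes the equal-length tie winner the earliest-in-original-order tag, exactly max's choice.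
import Mathlib
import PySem

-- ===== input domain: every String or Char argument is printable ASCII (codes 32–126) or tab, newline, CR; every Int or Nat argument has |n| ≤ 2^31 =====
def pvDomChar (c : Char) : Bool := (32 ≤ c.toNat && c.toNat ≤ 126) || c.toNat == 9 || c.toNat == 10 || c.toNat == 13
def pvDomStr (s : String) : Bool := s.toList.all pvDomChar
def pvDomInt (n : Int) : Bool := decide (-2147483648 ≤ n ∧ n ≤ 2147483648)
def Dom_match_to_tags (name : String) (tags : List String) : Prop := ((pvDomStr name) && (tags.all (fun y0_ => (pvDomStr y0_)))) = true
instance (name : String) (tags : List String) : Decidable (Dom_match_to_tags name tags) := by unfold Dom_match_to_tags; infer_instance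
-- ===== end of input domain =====

-- B sorts the tags once by descending length (stable) and returns the first tag that is a
-- substring of name.lower(), instead of A's collect-all-matches-then-max; same result, alternative algorithm.

-- ===== PORT A =====
def match_to_tags (name : String) (tags : List String) : String :=
  let found := tags.foldl
    (fun acc tag => if PySem.Str.isIn tag (PySem.Str.lower name) then acc ++ [tag] else acc) []
  match PySem.List.max? found PySem.Str.len with
  | none => "not labeled"          -- 'if not matches: return "not labeled"'
  | some m => m                    -- 'return max(matches, key=len)' (first extremal)

-- ===== PORT B =====
def match_to_tags_alt (name : String) (tags : List String) : String :=
  let nameLower := PySem.Str.lower name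
  -- 'for tag in sorted(tags, key=len, reverse=True): if tag in name_lower: return tag'
  match (PySem.List.sorted tags PySem.Str.len true).find? (fun tag => PySem.Str.isIn tag nameLower) with
  | some tag => tag
  | none => "not labeled"

-- ===== PRECONDITION & SPEC =====
def Spec_match_to_tags (name : String) (tags : List String) (out : String) : Prop := out = match_to_tags_alt name tags
instance (name : String) (tags : List String) (out : String) : Decidable (Spec_match_to_tags name tags out) := by unfold Spec_match_to_tags; infer_instance

-- ===== CLAIM (what is proved, stated in full; the proofs are below) =====
def Claim_equal_match_to_tags : Prop := ∀ (name : String) (tags : List String), Dom_match_to_tags name tags → Spec_match_to_tags name tags (match_to_tags name tags)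

-- ===== LEMMAS AND PROOFS =====

-- The first p-element after inserting x into a descending-sorted list: x wins exactly when
-- p x holds and x is strictly longer than the first p-element already present.
theorem pv_find?_insertBy {α κ : Type} [LinearOrder κ] (key : α → κ) (p : α → Bool) (x : α) (s : List α)
    (hs : s.Pairwise (fun a b => key b ≤ key a)) :
    (PySem.List.insertBy (fun a b => decide (key b < key a)) x s).find? p =
      match s.find? p with
      | none => if p x then some x else none
      | some m => if p x && decide (key m < key x) then some x else some m := by
  induction s with
  | nil => cases hpx : p x <;> simp [PySem.List.insertBy, hpx]
  | cons y ys ih =>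
    rw [List.pairwise_cons] at hs
    obtain ⟨hy, hys⟩ := hs
    by_cases hlt : key y < key x
    · have hins : PySem.List.insertBy (fun a b => decide (key b < key a)) x (y :: ys)
          = x :: y :: ys := by simp [PySem.List.insertBy, hlt]
      rw [hins]
      cases hpx : p x with
      | false =>
        rw [List.find?_cons_of_neg (by simp [hpx])]
        simp only [hpx, Bool.false_and, Bool.false_eq_true, if_false]
        cases (y :: ys).find? p <;> rfl
      | true =>
        rw [List.find?_cons_of_pos hpx]
        cases hfind : (y :: ys).find? p with
        | none => simp
        | some m =>
          have hm : m ∈ y :: ys := List.mem_of_find?_eq_some hfind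
          have hmy : key m ≤ key y := by
            rcases List.mem_cons.mp hm with h | h
            · exact h ▸ le_refl _
            · exact hy m h
          have hmx : key m < key x := lt_of_le_of_lt hmy hlt
          simp [hmx]
    · have hins : PySem.List.insertBy (fun a b => decide (key b < key a)) x (y :: ys)
          = y :: PySem.List.insertBy (fun a b => decide (key b < key a)) x ys := by
        simp [PySem.List.insertBy, hlt]
      rw [hins]
      cases hpy : p y with
      | true =>
        rw [List.find?_cons_of_pos hpy, List.find?_cons_of_pos hpy]
        simp [hlt]
      | false =>
        rw [List.find?_cons_of_neg (by simp [hpy]), List.find?_cons_of_neg (by simp [hpy])]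
        exact ih hys

-- Appending one element to a reverse sort is an insertBy into the sorted prefix.
theorem pv_sorted_rev_snoc {α κ : Type} [LinearOrder κ] (key : α → κ) (xs : List α) (x : α) :
    PySem.List.sorted (xs ++ [x]) key true
      = PySem.List.insertBy (fun a b => decide (key b < key a)) x (PySem.List.sorted xs key true) := by
  simp [PySem.List.sorted, List.foldl_append]

-- Main bridge: the first match in the descending-stable sort is the first longest match.
theorem pv_find?_sorted_eq_max?_filter {α κ : Type} [LinearOrder κ] (key : α → κ) (p : α → Bool) (tags : List α) :
    (PySem.List.sorted tags key true).find? p = PySem.List.max? (tags.filter p) key := by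
  induction tags using List.reverseRecOn with
  | nil => rfl
  | append_singleton xs x ih =>
    rw [pv_sorted_rev_snoc,
        pv_find?_insertBy key p x _ (PySem.List.sorted_pairwise_rev xs key)]
    cases hfind : List.find? p (PySem.List.sorted xs key true) with
    | none =>
      rw [ih] at hfind
      unfold PySem.List.max? at hfind ⊢
      rw [List.filter_append, List.foldl_append, hfind]
      cases hpx : p x <;> simp [hpx]
    | some m =>
      rw [ih] at hfind
      unfold PySem.List.max? at hfind ⊢
      rw [List.filter_append, List.foldl_append, hfind]
      cases hpx : p x with
      | false => simp [hpx]
      | true =>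
        by_cases h : key m < key x <;> simp [hpx, h]

-- ===== VERDICT (by name: the statement is the Claim_ definition above) =====
theorem match_to_tags_spec : Claim_equal_match_to_tags := by
  intro name tags _
  unfold Spec_match_to_tags match_to_tags match_to_tags_alt
  rw [PySem.List.foldl_append_if_eq_filter
        (fun tag => PySem.Str.isIn tag (PySem.Str.lower name)) tags []]
  simp only [List.nil_append]
  rw [← pv_find?_sorted_eq_max?_filter]
  cases (PySem.List.sorted tags PySem.Str.len true).find?
      (fun tag => PySem.Str.isIn tag (PySem.Str.lower name)) <;> rfl
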